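-- pv_equiv track=rewrite | github.com/ximezuber/ATI | src/utils/borders_utils.py | angles_matrix
-- ===== SOURCE A (Python) =====
-- import math
--
-- def angles_matrix(gx, gy):
--     angles = []
--     for i in range(len(gx)):
--         angles.append([])
--         for j in range(len(gx[0])):
--             if gx[i][j] == 0:
--                 angles[i].append(90)
--             else:
--                 angle = math.atan2(gy[i][j], gx[i][j])
--                 angle = angle_to_direction(angle)
--                 angles[i].append(angle)
--     return angles
--
-- def angle_to_direction(angle_in_rad):
--     angle = math.degrees(angle_in_rad)
--     if angle < 0:
--         angle += 360
--     if angle >= 180: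
--         angle -= 180
--     interval = 22.5
--     if angle < interval or 180 - interval <= angle < 180:
--         return 0
--     elif 45 - interval <= angle < 45 + interval:
--         return 135
--     elif 90 - interval <= angle < 90 + interval:
--         return 90
--     elif 135 - interval <= angle < 135 + interval:
--         return 45
-- ===== SOURCE B (Python) =====
-- # Exact integer classification (no trig): octant test via squared comparisons + table lookup,
-- # zip/comprehension traversal instead of index loops.
-- def angles_matrix(gx, gy):
--     if not gx:
--         return []
--     w = len(gx[0])
--     return [[_direction(xr[j], yr[j]) for j in range(w)] for xr, yr in zip(gx, gy)]
--
-- def _direction(x, y):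
--     if x == 0:
--         return 90
--     ax, ay = abs(x), abs(y)
--     near = 1 if 2 * ax * ax <= (ax + ay) ** 2 else 0              # |slope| >= tan 22.5deg
--     steep = 1 if ax < ay and 2 * ax * ax <= (ay - ax) ** 2 else 0  # |slope| >= tan 67.5deg
--     return (0, 135 if x * y > 0 else 45, 90)[near + steep]
-- ===== Notes on version B (the rewrite author's own statement) =====
-- stated objective: alternative
-- what changed: Replaces the float atan2/degrees computation and the four-interval if-elif ladder by an exact integer octant test (two squared comparisons against tan 22.5/67.5 plus a sign) indexing a 3-entry table, and replaces the index-based nested loops by a zip/comprehension traversal.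
-- outside the precondition, e.g. on angles_matrix([[93222358]], [[-38613965]]): A returns [[0]], B returns [[45]]; on angles_matrix([[]], []): A returns [[]], B returns []
import Mathlib
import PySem

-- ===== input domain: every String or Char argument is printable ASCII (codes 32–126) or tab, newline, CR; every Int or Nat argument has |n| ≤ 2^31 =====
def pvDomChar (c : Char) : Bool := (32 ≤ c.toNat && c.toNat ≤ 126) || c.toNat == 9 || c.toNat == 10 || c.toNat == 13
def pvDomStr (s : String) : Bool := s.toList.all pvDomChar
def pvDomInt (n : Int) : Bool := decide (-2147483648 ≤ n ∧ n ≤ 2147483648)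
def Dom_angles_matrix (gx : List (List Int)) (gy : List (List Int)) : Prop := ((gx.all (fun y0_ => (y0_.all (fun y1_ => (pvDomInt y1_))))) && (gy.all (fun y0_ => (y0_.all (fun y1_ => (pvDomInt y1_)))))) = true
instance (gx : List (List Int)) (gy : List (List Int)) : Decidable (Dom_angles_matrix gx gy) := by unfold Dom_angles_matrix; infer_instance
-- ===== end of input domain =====

-- B replaces A's float atan2/degrees + four-interval if-elif ladder by an exact integer octant test
-- indexing a 3-entry table, and the index-based nested loops by a zip/comprehension traversal
-- (objective: alternative; not claimed faster).

-- ===== PORT A =====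
-- Port of angle_to_direction ∘ degrees ∘ atan2: floats are not portable, so each float comparison of the
-- normalized angle against a bucket boundary is replaced by the EXACT rational comparison it computes
-- (|slope| vs tan 22.5° = √2−1 and tan 67.5° = √2+1, squared; equality cases are impossible over ℤ with x ≠ 0).
-- This is exact except when the slope is within float-rounding distance of a bucket boundary;
-- Pre_angles_matrix excludes that band (cellSafe below).
-- The angle A normalizes into [0,180) depends only on the line through (x,y), so (y,x) with x < 0 is first
-- replaced by (-y,-x), matching A's 'if angle < 0: += 360' / 'if angle >= 180: -= 180' normalization.
def dirA (y : Int) (x : Int) : Int :=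
  let x' := if x < 0 then -x else x
  let y' := if x < 0 then -y else y
  if (x' + |y'|)^2 < 2*x'^2 then 0                                                      -- angle < 22.5 ∨ 157.5 ≤ angle < 180
  else if 0 < y' ∧ 2*x'^2 ≤ (x' + y')^2 ∧ (y' ≤ x' ∨ (y' - x')^2 < 2*x'^2) then 135     -- 22.5 ≤ angle < 67.5
  else if x' < |y'| ∧ 2*x'^2 ≤ (|y'| - x')^2 then 90                                    -- 67.5 ≤ angle < 112.5
  else if y' < 0 ∧ (|y'| ≤ x' ∨ (|y'| - x')^2 ≤ 2*x'^2) ∧ 2*x'^2 ≤ (x' + |y'|)^2 then 45 -- 112.5 ≤ angle < 157.5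
  else 45   -- unreachable for x ≠ 0: the four intervals cover [0,180) (Python's fall-through would be None)

def angles_matrix (gx : List (List Int)) (gy : List (List Int)) : List (List Int) :=
  (PySem.List.pyRange 0 gx.length 1).foldl (fun angles i =>
    angles ++ [(PySem.List.pyRange 0 ((PySem.List.pyGetD gx 0 []).length) 1).foldl (fun row j =>
      if PySem.List.pyGetD (PySem.List.pyGetD gx i []) j 0 = 0 then row ++ [90]
      else row ++ [dirA (PySem.List.pyGetD (PySem.List.pyGetD gy i []) j 0)
                        (PySem.List.pyGetD (PySem.List.pyGetD gx i []) j 0)]) []]) []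

-- ===== PORT B =====
def dirB (x : Int) (y : Int) : Int :=
  if x = 0 then 90
  else
    let ax := |x|
    let ay := |y|
    let near : Nat := if 2*ax^2 ≤ (ax + ay)^2 then 1 else 0
    let steep : Nat := if ax < ay ∧ 2*ax^2 ≤ (ay - ax)^2 then 1 else 0
    [(0 : Int), if 0 < x*y then 135 else 45, 90].getD (near + steep) 0

def angles_matrix_alt (gx : List (List Int)) (gy : List (List Int)) : List (List Int) :=
  match gx with
  | [] => []
  | r0 :: _ =>
    (gx.zip gy).map (fun p => (PySem.List.pyRange 0 r0.length 1).map (fun j =>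
      dirB (PySem.List.pyGetD p.1 j 0) (PySem.List.pyGetD p.2 j 0)))

-- ===== PRECONDITION & SPEC =====
-- A cell is "safe" when its slope is far enough from the bucket boundaries tan 22.5° / tan 67.5° that A's
-- float atan2/degrees pipeline (error ≲ 10⁻¹⁵) lands in the same bucket as exact arithmetic (margin ≈ 10⁻¹²).
abbrev cellSafe (x : Int) (y : Int) : Prop :=
  x = 0 ∨ (1000000000000 * |(|x| + |y|)^2 - 2*|x|^2| ≥ |x|^2 ∧
           1000000000000 * |(|y| - |x|)^2 - 2*|x|^2| ≥ |x|^2)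

-- Pre_ is exactly where Python A returns (gy has a row of length ≥ len(gx[0]) for every row of gx, and every
-- gx row is at least that long; otherwise A raises IndexError), MINUS two kinds of inputs on which A still
-- returns: (1) cells whose slope is so close to a bucket boundary that A's float rounding may pick either
-- adjacent bucket, a corner where both answers are defensible; (2) the degenerate case len(gx[0]) = 0 with
-- fewer gy rows than gx rows, where A never reads gy and returns len(gx) empty rows while B returns
-- len(gy) empty rows — nothing meaningful is computed there.
def Pre_angles_matrix (gx : List (List Int)) (gy : List (List Int)) : Prop :=
  gx = [] ∨
    (gx.length ≤ gy.length ∧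
     (∀ r ∈ gx, (gx.headD []).length ≤ r.length) ∧
     (∀ r ∈ gy.take gx.length, (gx.headD []).length ≤ r.length) ∧
     (∀ p ∈ gx.zip gy, ∀ q ∈ (p.1.zip p.2).take (gx.headD []).length, cellSafe q.1 q.2))

instance (gx : List (List Int)) (gy : List (List Int)) : Decidable (Pre_angles_matrix gx gy) := by
  unfold Pre_angles_matrix cellSafe; infer_instance

def pvWitness_angles_matrix : List (List Int) × List (List Int) := ([[1, -3], [0, 7]], [[2, 0], [5, -7]])

def Spec_angles_matrix (gx : List (List Int)) (gy : List (List Int)) (out : List (List Int)) : Prop := out = angles_matrix_alt gx gy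
instance (gx : List (List Int)) (gy : List (List Int)) (out : List (List Int)) : Decidable (Spec_angles_matrix gx gy out) := by unfold Spec_angles_matrix; infer_instance

-- ===== CLAIM (what is proved, stated in full; the proofs are below) =====
def Claim_equal_angles_matrix : Prop := ∀ (gx : List (List Int)) (gy : List (List Int)), Dom_angles_matrix gx gy → Pre_angles_matrix gx gy → Spec_angles_matrix gx gy (angles_matrix gx gy)

-- ===== LEMMAS AND PROOFS =====

-- Per-cell agreement of the two exact classifications, for x > 0 (the normalized case).
lemma dir_pos (e a : Int) (ha : 0 < a) : dirA e a = dirB a e := by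
  have hax : |a| = a := abs_of_pos ha
  have h0 : (0:Int) < a^2 := by positivity
  unfold dirA dirB
  simp only [if_neg (show ¬ (a < 0) by omega), if_neg (show ¬ (a = 0) by omega), hax]
  rcases abs_cases e with ⟨habs, hse⟩ | ⟨habs, hse⟩ <;> rw [habs]
  · have hQP : (e - a)^2 ≤ (a + e)^2 := by nlinarith [mul_nonneg ha.le hse]
    by_cases h1 : (a + e)^2 < 2*a^2
    · have hn : ¬ (2*a^2 ≤ (a + e)^2) := by linarith
      have hs : ¬ (a < e ∧ 2*a^2 ≤ (e - a)^2) := by rintro ⟨_, h⟩; linarith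
      simp [h1, hn, hs]
    · rw [not_lt] at h1
      by_cases hst : a < e ∧ 2*a^2 ≤ (e - a)^2
      · have hc2 : ¬ (0 < e ∧ 2*a^2 ≤ (a + e)^2 ∧ (e ≤ a ∨ (e - a)^2 < 2*a^2)) := by
          rintro ⟨_, _, h3 | h3⟩
          · linarith [hst.1]
          · linarith [hst.2]
        simp [if_neg (not_lt.mpr h1), hst, h1]
      · have he0 : 0 < e := by
          rcases lt_or_eq_of_le hse with h | h
          · exact h
          · exfalso; rw [← h] at h1; simp at h1; nlinarith
        have hc2 : 0 < e ∧ 2*a^2 ≤ (a + e)^2 ∧ (e ≤ a ∨ (e - a)^2 < 2*a^2) := by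
          refine ⟨he0, h1, ?_⟩
          rcases not_and_or.mp hst with h | h
          · exact Or.inl (by omega)
          · exact Or.inr (not_le.mp h)
        have hmul : 0 < a * e := mul_pos ha he0
        simp [if_neg (not_lt.mpr h1), hc2, hst, hmul]
  · have hQP : (-e - a)^2 ≤ (a + -e)^2 := by nlinarith [mul_pos ha (by omega : (0:Int) < -e)]
    have hne : ¬ (0 < e) := by omega
    by_cases h1 : (a + -e)^2 < 2*a^2
    · have hn : ¬ (2*a^2 ≤ (a + -e)^2) := by linarith
      have hs : ¬ (a < -e ∧ 2*a^2 ≤ (-e - a)^2) := by rintro ⟨_, h⟩; linarith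
      simp [h1, hn, hs]
    · rw [not_lt] at h1
      by_cases hst : a < -e ∧ 2*a^2 ≤ (-e - a)^2
      · simp [if_neg (not_lt.mpr h1), hst, h1, hne]
      · have hmul : ¬ (0 < a * e) := by
          have : a * e < 0 := mul_neg_of_pos_of_neg ha hse
          omega
        simp [if_neg (not_lt.mpr h1), hst, h1, hne, hmul, ite_self]

-- Per-cell agreement including A's gx == 0 short-circuit.
lemma dir_cell (x y : Int) : (if x = 0 then (90 : Int) else dirA y x) = dirB x y := by
  by_cases hx : x = 0
  · simp [hx, dirB]
  · rw [if_neg hx]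
    rcases lt_or_gt_of_ne hx with hneg | hpos
    · have hA : dirA y x = dirA (-y) (-x) := by
        simp only [dirA, if_pos hneg, if_neg (show ¬ (-x < 0) by omega)]
      have hB : dirB x y = dirB (-x) (-y) := by
        simp only [dirB, if_neg hx, if_neg (show ¬ (-x = 0) by omega), abs_neg, neg_mul_neg]
      rw [hA, hB]
      exact dir_pos (-y) (-x) (by omega)
    · exact dir_pos y x hpos

-- Index traversal over two parallel lists equals traversal of their zip, when the second is long enough.
lemma map_range_eq_zip {α β γ : Type} (F : α → β → γ) (d1 : α) (d2 : β) :
    ∀ (xs : List α) (ys : List β), xs.length ≤ ys.length →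
    (List.range xs.length).map (fun k => F (xs.getD k d1) (ys.getD k d2)) =
      (xs.zip ys).map (fun p => F p.1 p.2) := by
  intro xs
  induction xs with
  | nil => intro ys h; simp
  | cons x xs ih =>
    intro ys h
    cases ys with
    | nil => simp at h
    | cons y ys =>
      rw [List.length_cons, List.range_succ_eq_map, List.map_cons, List.map_map]
      simp only [List.getD_cons_zero, List.zip_cons_cons, List.map_cons]
      exact congrArg _ (ih ys (by simpa using h))

-- ===== VERDICT (by name: the statement is the Claim_ definition above) =====
theorem angles_matrix_spec : Claim_equal_angles_matrix := by
  intro gx gy _ hpre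
  unfold Spec_angles_matrix
  cases gx with
  | nil =>
      simp [angles_matrix, angles_matrix_alt, PySem.List.pyRange_one_eq_nil (le_refl (0:Int))]
  | cons r0 rest =>
      have hlen : (r0 :: rest).length ≤ gy.length := by
        rcases hpre with h | ⟨h, _⟩
        · exact absurd h (by simp)
        · exact h
      unfold angles_matrix
      simp only [angles_matrix_alt]
      rw [PySem.List.foldl_append_singleton_eq_map, List.nil_append,
        PySem.List.pyRange_zero_nat ((r0 :: rest).length), List.map_map]
      simp only [Function.comp_def, PySem.List.pyGetD_natCast, PySem.List.pyGetD_zero_cons]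
      rw [map_range_eq_zip (fun r1 r2 => (PySem.List.pyRange 0 (r0.length) 1).foldl (fun row j =>
            if PySem.List.pyGetD r1 j 0 = 0 then row ++ [90]
            else row ++ [dirA (PySem.List.pyGetD r2 j 0) (PySem.List.pyGetD r1 j 0)]) [])
          [] [] (r0 :: rest) gy hlen]
      refine List.map_congr_left ?_
      intro p _
      rw [show (fun (row : List Int) (j : Int) =>
            if PySem.List.pyGetD p.1 j 0 = 0 then row ++ [90]
            else row ++ [dirA (PySem.List.pyGetD p.2 j 0) (PySem.List.pyGetD p.1 j 0)])
          = (fun row j => row ++ [if PySem.List.pyGetD p.1 j 0 = 0 then (90:Int)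
              else dirA (PySem.List.pyGetD p.2 j 0) (PySem.List.pyGetD p.1 j 0)]) from
          by funext row j; split <;> rfl,
        PySem.List.foldl_append_singleton_eq_map]
      simp only [List.nil_append]
      refine List.map_congr_left ?_
      intro j _
      exact dir_cell _ _
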